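-- pv_equiv track=rewrite | github.com/s4007755/aa-660-ai-doc-classification-deduplication | src/services/openai_service.py | _find_closest_category
-- ===== SOURCE A (Python) =====
-- from typing import List, Dict, Any, Optional
--
-- def _find_closest_category(predicted: str, categories: List[str]) -> str:
--     """Find the closest matching category."""
--     predicted_lower = predicted.lower()
--
--     # Try exact match first
--     for category in categories:
--         if predicted_lower == category.lower():
--             return category
--
--     # Try partial match
--     for category in categories:
--         if predicted_lower in category.lower() or category.lower() in predicted_lower:
--             return category
--
--     # Return first category if no match found
--     return categories[0] if categories else "unknown"
-- ===== SOURCE B (Python) =====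
-- from typing import List
--
-- def _find_closest_category(predicted: str, categories: List[str]) -> str:
--     """Find the closest matching category (single pass)."""
--     predicted_lower = predicted.lower()
--     first_partial = None
--     for category in categories:
--         cl = category.lower()
--         if predicted_lower == cl:
--             return category
--         if first_partial is None and (predicted_lower in cl or cl in predicted_lower):
--             first_partial = category
--     if first_partial is not None:
--         return first_partial
--     return categories[0] if categories else "unknown"
-- ===== Notes on version B (the rewrite author's own statement) =====
-- stated objective: alternative
-- what changed: Replaces A's two sequential scans (exact match, then partial match) by a single traversal that returns on an exact match and maintains a first-partial-match sentinel, falling back to it after the loop.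
import Mathlib
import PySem

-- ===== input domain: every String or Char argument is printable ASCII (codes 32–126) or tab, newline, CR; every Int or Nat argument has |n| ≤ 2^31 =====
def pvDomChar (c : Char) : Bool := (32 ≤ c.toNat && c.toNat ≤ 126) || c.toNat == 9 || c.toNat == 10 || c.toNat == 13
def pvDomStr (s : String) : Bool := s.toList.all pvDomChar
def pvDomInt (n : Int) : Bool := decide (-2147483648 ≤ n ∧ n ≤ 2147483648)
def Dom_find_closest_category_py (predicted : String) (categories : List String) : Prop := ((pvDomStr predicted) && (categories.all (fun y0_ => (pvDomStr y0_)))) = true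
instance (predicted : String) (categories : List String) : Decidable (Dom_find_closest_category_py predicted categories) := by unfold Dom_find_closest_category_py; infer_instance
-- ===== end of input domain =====

-- B merges A's two sequential scans into one pass with a first-partial-match sentinel (alternative decomposition, same cost).


-- ===== PORT A =====
-- first category whose lowercase equals predicted_lower (A's first loop)
def pvExactScan (pl : String) : List String → Option String
  | [] => none
  | c :: rest => if pl == PySem.Str.lower c then some c else pvExactScan pl rest

-- first category partially matching predicted_lower (A's second loop)
def pvPartScan (pl : String) : List String → Option String
  | [] => none
  | c :: rest =>
      if PySem.Str.isIn pl (PySem.Str.lower c) || PySem.Str.isIn (PySem.Str.lower c) pl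
      then some c else pvPartScan pl rest

def find_closest_category_py (predicted : String) (categories : List String) : String :=
  let pl := PySem.Str.lower predicted
  match pvExactScan pl categories with
  | some c => c
  | none =>
    match pvPartScan pl categories with
    | some c => c
    | none => categories.headD "unknown"

-- ===== PORT B =====
-- single pass: return on exact match, remember the first partial match in fp
def pvAltGo (pl : String) (fp : Option String) : List String → Option String
  | [] => fp
  | c :: rest =>
      let cl := PySem.Str.lower c
      if pl == cl then some c
      else pvAltGo pl
        (if fp.isNone && (PySem.Str.isIn pl cl || PySem.Str.isIn cl pl) then some c else fp) rest

def find_closest_category_py_alt (predicted : String) (categories : List String) : String :=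
  let pl := PySem.Str.lower predicted
  match pvAltGo pl none categories with
  | some c => c
  | none => categories.headD "unknown"

-- ===== PRECONDITION & SPEC =====
def Spec_find_closest_category_py (predicted : String) (categories : List String) (out : String) : Prop := out = find_closest_category_py_alt predicted categories
instance (predicted : String) (categories : List String) (out : String) : Decidable (Spec_find_closest_category_py predicted categories out) := by unfold Spec_find_closest_category_py; infer_instance

-- ===== CLAIM (what is proved, stated in full; the proofs are below) =====
def Claim_equal_find_closest_category_py : Prop := ∀ (predicted : String) (categories : List String), Dom_find_closest_category_py predicted categories → Spec_find_closest_category_py predicted categories (find_closest_category_py predicted categories)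

-- ===== LEMMAS AND PROOFS =====
theorem pvAltGo_eq (pl : String) (cats : List String) : ∀ fp : Option String,
    pvAltGo pl fp cats =
      match pvExactScan pl cats with
      | some c => some c
      | none => fp.or (pvPartScan pl cats) := by
  induction cats with
  | nil => intro fp; simp [pvAltGo, pvExactScan, pvPartScan]
  | cons c rest ih =>
    intro fp
    simp only [pvAltGo, pvExactScan, pvPartScan]
    by_cases he : (pl == PySem.Str.lower c) = true
    · rw [if_pos he, if_pos he]
    · rw [if_neg he, if_neg he, ih]
      cases fp with
      | none =>
        simp only [Option.isNone_none, Bool.true_and]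
        by_cases hp : (PySem.Str.isIn pl (PySem.Str.lower c) || PySem.Str.isIn (PySem.Str.lower c) pl) = true
        · rw [if_pos hp, if_pos hp]
          cases pvExactScan pl rest <;> simp [Option.or]
        · rw [if_neg hp, if_neg hp]
      | some v => cases pvExactScan pl rest <;> rfl

-- ===== VERDICT (by name: the statement is the Claim_ definition above) =====
theorem find_closest_category_py_spec : Claim_equal_find_closest_category_py := by
  intro predicted categories _
  unfold Spec_find_closest_category_py find_closest_category_py find_closest_category_py_alt
  simp only [pvAltGo_eq]
  cases pvExactScan (PySem.Str.lower predicted) categories <;>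
    cases pvPartScan (PySem.Str.lower predicted) categories <;> simp [Option.or]
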